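-- pv_equiv track=rewrite | github.com/YuvalGerzii/one_colsilidated_app | labor_transofrmation/Labor-market-disruption-inequality/backend/app/models/skills_certification.py | _calculate_total_prep_time
-- ===== SOURCE A (Python) =====
-- from typing import Dict, List, Any, Optional
--
-- def _calculate_total_prep_time(missing_skills: List[Dict[str, Any]],
--                                weak_skills: List[Dict[str, Any]]) -> str:
--     """Calculate total preparation time"""
--     total_weeks = 0
--
--     for skill in missing_skills[:3]:  # Top 3 critical
--         total_weeks += 8  # 8 weeks per missing skill
--
--     for skill in weak_skills[:2]:  # Top 2 weak
--         total_weeks += 4  # 4 weeks to improve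
--
--     return f"{total_weeks} weeks at 10-15 hours/week"
-- ===== SOURCE B (Python) =====
-- from typing import Dict, List, Any
--
-- def _calculate_total_prep_time(missing_skills: List[Dict[str, Any]],
--                                weak_skills: List[Dict[str, Any]]) -> str:
--     """Closed form: the loops only count capped list lengths."""
--     total_weeks = 8 * min(len(missing_skills), 3) + 4 * min(len(weak_skills), 2)
--     return f"{total_weeks} weeks at 10-15 hours/week"
-- ===== Notes on version B (the rewrite author's own statement) =====
-- stated objective: simpler
-- what changed: Replaced the two accumulation loops over sliced lists with a direct arithmetic formula 8*min(len(missing),3) + 4*min(len(weak),2).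
import Mathlib
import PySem

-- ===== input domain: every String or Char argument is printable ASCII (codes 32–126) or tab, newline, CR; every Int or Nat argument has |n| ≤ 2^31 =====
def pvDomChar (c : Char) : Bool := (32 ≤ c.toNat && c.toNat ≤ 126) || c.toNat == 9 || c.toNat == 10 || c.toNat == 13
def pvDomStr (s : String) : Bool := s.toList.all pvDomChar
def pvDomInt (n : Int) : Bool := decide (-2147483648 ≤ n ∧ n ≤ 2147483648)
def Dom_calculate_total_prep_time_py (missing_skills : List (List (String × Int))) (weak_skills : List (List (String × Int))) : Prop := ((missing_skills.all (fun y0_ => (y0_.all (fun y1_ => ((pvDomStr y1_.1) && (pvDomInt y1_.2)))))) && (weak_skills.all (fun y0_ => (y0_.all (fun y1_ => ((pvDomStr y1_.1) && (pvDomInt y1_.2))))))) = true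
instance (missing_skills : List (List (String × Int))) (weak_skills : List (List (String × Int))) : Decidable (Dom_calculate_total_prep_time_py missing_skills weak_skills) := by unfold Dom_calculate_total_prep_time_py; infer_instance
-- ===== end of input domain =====

-- ===== PORT A =====
-- Port of A: fold the loops over the Python slices [:3] and [:2].
def calculate_total_prep_time_py (missing_skills : List (List (String × Int))) (weak_skills : List (List (String × Int))) : String :=
  let total_weeks : Int := 0
  let total_weeks := (PySem.List.slice missing_skills none (some 3)).foldl (fun acc _ => acc + 8) total_weeks
  let total_weeks := (PySem.List.slice weak_skills none (some 2)).foldl (fun acc _ => acc + 4) total_weeks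
  PySem.Int.toStr total_weeks ++ " weeks at 10-15 hours/week"

-- ===== PORT B =====
-- Port of B: closed-form arithmetic, no iteration.
def calculate_total_prep_time_py_alt (missing_skills : List (List (String × Int))) (weak_skills : List (List (String × Int))) : String :=
  let total_weeks : Int := 8 * min (missing_skills.length : Int) 3 + 4 * min (weak_skills.length : Int) 2
  PySem.Int.toStr total_weeks ++ " weeks at 10-15 hours/week"

-- ===== PRECONDITION & SPEC =====
def Spec_calculate_total_prep_time_py (missing_skills : List (List (String × Int))) (weak_skills : List (List (String × Int))) (out : String) : Prop := out = calculate_total_prep_time_py_alt missing_skills weak_skills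
instance (missing_skills : List (List (String × Int))) (weak_skills : List (List (String × Int))) (out : String) : Decidable (Spec_calculate_total_prep_time_py missing_skills weak_skills out) := by unfold Spec_calculate_total_prep_time_py; infer_instance

-- ===== CLAIM (what is proved, stated in full; the proofs are below) =====
def Claim_equal_calculate_total_prep_time_py : Prop := ∀ (missing_skills : List (List (String × Int))) (weak_skills : List (List (String × Int))), Dom_calculate_total_prep_time_py missing_skills weak_skills → Spec_calculate_total_prep_time_py missing_skills weak_skills (calculate_total_prep_time_py missing_skills weak_skills)

-- ===== LEMMAS AND PROOFS =====

-- ===== VERDICT (by name: the statement is the Claim_ definition above) =====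
lemma pv_foldl_const_add (c : Int) (l : List (List (String × Int))) (i : Int) :
    l.foldl (fun a _ => a + c) i = i + c * l.length := by
  induction l generalizing i with
  | nil => simp
  | cons x xs ih => simp [List.foldl, ih]; ring

theorem calculate_total_prep_time_py_spec : Claim_equal_calculate_total_prep_time_py := by
  intro ms ws _
  show _ = _
  have e1 : PySem.List.slice ms none (some (3:Int)) = ms.take 3 := by simp [pysem]
  have e2 : PySem.List.slice ws none (some (2:Int)) = ws.take 2 := by simp [pysem]
  simp only [calculate_total_prep_time_py, calculate_total_prep_time_py_alt,
    e1, e2, pv_foldl_const_add]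
  congr 1
  congr 1
  simp only [List.length_take]
  push_cast
  omega
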